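-- pv_equiv track=rewrite | github.com/hyeonwowo/vsCode | 알고리즘2/03.ShellSort/Hsort(2).py | hInsertionSort
-- ===== SOURCE A (Python) =====
-- def hInsertionSort(a,h):
--     for i in range(h,len(a)):
--         key = a[i]
--         j = i-h
--         while j>=0 and key < a[j]:
--             a[j+h] = a[j]
--             j -= h
--         a[j+h] = key
--     return a
-- ===== SOURCE B (Python) =====
-- def hInsertionSort(a, h):
--     # Sort each stride-h residue slice with the built-in sort; the groups are
--     # independent, so the in-place result matches A's interleaved pass.
--     # Slices starting at or beyond len(a) are empty, hence the min().
--     for s in range(min(h, len(a))):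
--         a[s::h] = sorted(a[s::h])
--     return a
-- ===== Notes on version B (the rewrite author's own statement) =====
-- stated objective: idiomatic
-- what changed: A's single interleaved gap-insertion pass (outer index loop with an inner shift-while) is replaced by sorting each of the h independent stride-h slices with the built-in sort and assigning it back (a[s::h] = sorted(a[s::h])).
import Mathlib
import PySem

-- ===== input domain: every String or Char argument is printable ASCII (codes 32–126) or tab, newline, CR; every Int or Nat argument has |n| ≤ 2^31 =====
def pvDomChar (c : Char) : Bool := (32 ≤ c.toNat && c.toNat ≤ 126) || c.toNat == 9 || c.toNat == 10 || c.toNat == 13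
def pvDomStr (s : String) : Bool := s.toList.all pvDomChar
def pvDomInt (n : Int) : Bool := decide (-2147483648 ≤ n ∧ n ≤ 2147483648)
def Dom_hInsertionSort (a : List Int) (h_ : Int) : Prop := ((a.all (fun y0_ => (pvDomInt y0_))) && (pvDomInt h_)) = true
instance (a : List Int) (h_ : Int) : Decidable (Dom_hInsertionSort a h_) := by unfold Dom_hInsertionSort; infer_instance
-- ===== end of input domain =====

-- B replaces A's interleaved gap-insertion pass by sorting each stride-h slice with the
-- library sort; both Pythons mutate `a` in place in the same way (same final contents of
-- the same list object) — the theorems below are about the returned value.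

-- ===== PORT A =====
-- the inner `while j>=0 and key < a[j]` loop; fuel bounds the iterations (it is ample
-- whenever h ≥ 1, and for h = 0 the loop exits at once; h < 0 is outside Pre_).
def pvShift (fuel : Nat) (c : List Int) (key j h : Int) : List Int × Int :=
  match fuel with
  | 0 => (c, j)
  | fuel + 1 =>
    if 0 ≤ j ∧ key < PySem.List.pyGetD c j 0 then
      pvShift fuel (c.set (j + h).toNat (PySem.List.pyGetD c j 0)) key (j - h) h
    else (c, j)

-- one iteration of A's outer `for i in range(h, len(a))` loop
def pvStepA (h : Int) (c : List Int) (i : Int) : List Int :=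
  let key := PySem.List.pyGetD c i 0
  let r := pvShift (i.toNat + 1) c key (i - h) h
  r.1.set (r.2 + h).toNat key

def hInsertionSort (a : List Int) (h_ : Int) : List Int :=
  (PySem.List.pyRange h_ (a.length : Int) 1).foldl (pvStepA h_) a

-- ===== PORT B =====
-- extended-slice ASSIGNMENT a[s::h] = vs, ported by hand (exact for 0 ≤ s, h ≥ 1: Python
-- writes vs positionally at indices s, s+h, s+2h, … < len)
def pvScatter (c : List Int) (idxs : List Int) (vs : List Int) : List Int :=
  (idxs.zip vs).foldl (fun acc p => acc.set p.1.toNat p.2) c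

def hInsertionSort_alt (a : List Int) (h_ : Int) : List Int :=
  (PySem.List.pyRange 0 (min h_ (a.length : Int)) 1).foldl (fun acc s =>
    let g := (PySem.List.slice? acc (some s) none h_).getD []   -- a[s::h]
    pvScatter acc (PySem.List.pyRange s (acc.length : Int) h_)
      (PySem.List.sorted g (fun x => x))) a

-- ===== PRECONDITION & SPEC =====
-- Pre_ excludes exactly h_ < 0, on which Python A raises IndexError (range(h, len(a))
-- yields negative start indices and the final shift walks past the end of the list).
def Pre_hInsertionSort (a : List Int) (h_ : Int) : Prop := 0 ≤ h_
instance (a : List Int) (h_ : Int) : Decidable (Pre_hInsertionSort a h_) := by unfold Pre_hInsertionSort; infer_instance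
def pvWitness_hInsertionSort : List Int × Int := ([5, 1, 4, 2, 3], 2)

def Spec_hInsertionSort (a : List Int) (h_ : Int) (out : List Int) : Prop := out = hInsertionSort_alt a h_
instance (a : List Int) (h_ : Int) (out : List Int) : Decidable (Spec_hInsertionSort a h_ out) := by unfold Spec_hInsertionSort; infer_instance

-- ===== CLAIM (what is proved, stated in full; the proofs are below) =====
def Claim_equal_hInsertionSort : Prop := ∀ (a : List Int) (h_ : Int), Dom_hInsertionSort a h_ → Pre_hInsertionSort a h_ → Spec_hInsertionSort a h_ (hInsertionSort a h_)

-- ===== LEMMAS AND PROOFS =====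

-- Nat-indexed view of the h groups: indices < i congruent to s mod H, and their values.
def gIdx (H s i : Nat) : List Nat := (List.range i).filter (fun k => k % H == s)
def gVals (c : List Int) (H s i : Nat) : List Int := (gIdx H s i).map (fun k => c.getD k 0)

-- inserting `key` into a reversed (weakly decreasing) prefix, as the while loop does
def insRev (key : Int) : List Int → List Int
  | [] => [key]
  | x :: xs => if key < x then x :: insRev key xs else key :: x :: xs

lemma insRev_perm (key : Int) (xs : List Int) : (insRev key xs).Perm (key :: xs) := by
  induction xs with
  | nil => simp [insRev]
  | cons x xs ih =>
    simp only [insRev]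
    split_ifs with h
    · exact (ih.cons x).trans (List.Perm.swap key x xs)
    · exact List.Perm.refl _

lemma insRev_pairwise (key : Int) (xs : List Int)
    (h : xs.Pairwise (fun a b => b ≤ a)) :
    (insRev key xs).Pairwise (fun a b => b ≤ a) := by
  induction xs with
  | nil => simp [insRev]
  | cons x xs ih =>
    rcases List.pairwise_cons.1 h with ⟨hx, hxs⟩
    simp only [insRev]
    split_ifs with hk
    · refine List.pairwise_cons.2 ⟨?_, ih hxs⟩
      intro b hb
      have hb' := (insRev_perm key xs).mem_iff.1 hb
      rcases List.mem_cons.1 hb' with rfl | hb''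
      · exact le_of_lt hk
      · exact hx b hb''
    · refine List.pairwise_cons.2 ⟨?_, h⟩
      intro b hb
      rcases List.mem_cons.1 hb with rfl | hb'
      · exact not_lt.1 hk
      · exact le_trans (hx b hb') (not_lt.1 hk)

lemma mem_gIdx {H s i k : Nat} : k ∈ gIdx H s i ↔ k < i ∧ k % H = s := by
  simp [gIdx, List.mem_filter, List.mem_range, and_comm]

lemma gIdx_succ (H s i : Nat) :
    gIdx H s (i + 1) = gIdx H s i ++ (if i % H = s then [i] else []) := by
  simp [gIdx, List.range_succ, List.filter_append]
  split_ifs with h <;> simp [h]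

lemma gIdx_pairwise (H s i : Nat) : (gIdx H s i).Pairwise (· < ·) :=
  List.Pairwise.filter _ List.pairwise_lt_range

lemma gIdx_nodup (H s i : Nat) : (gIdx H s i).Nodup :=
  (gIdx_pairwise H s i).imp (fun h => Nat.ne_of_lt h)

lemma gIdx_small (H s i : Nat) (h : i ≤ H) :
    gIdx H s i = if s < i then [s] else [] := by
  induction i with
  | zero => simp [gIdx]
  | succ i ih =>
    have hiH : i < H := h
    rw [gIdx_succ, ih (le_of_lt hiH), Nat.mod_eq_of_lt hiH]
    rcases Nat.lt_trichotomy s i with hlt | rfl | hgt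
    · rw [if_pos hlt, if_neg (by omega), if_pos (by omega)]; simp
    · rw [if_neg (by omega), if_pos rfl, if_pos (by omega)]; simp
    · rw [if_neg (by omega), if_neg (by omega), if_neg (by omega)]; simp

lemma gIdx_block (H s : Nat) (hs : s < H) (j : Nat) (hj : j % H = s) :
    ∀ r, r ≤ H → gIdx H s (j + r) = gIdx H s j ++ (if 0 < r then [j] else []) := by
  intro r
  induction r with
  | zero => simp
  | succ r ih =>
    intro hr
    rw [show j + (r+1) = (j + r) + 1 by omega, gIdx_succ, ih (by omega)]
    rcases Nat.eq_zero_or_pos r with rfl | hrpos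
    · simp [hj]
    · have : (j + r) % H ≠ s := by
        rw [Nat.add_mod, hj, Nat.mod_eq_of_lt (show r < H by omega)]
        rcases Nat.lt_or_ge (s + r) H with hlt | hge
        · rw [Nat.mod_eq_of_lt hlt]; omega
        · rw [Nat.mod_eq_sub_mod hge, Nat.mod_eq_of_lt (by omega)]; omega
      rw [if_neg this, if_pos hrpos, if_pos (by omega)]
      simp

lemma gIdx_ge_nil (H s n : Nat) (h : n ≤ s) : gIdx H s n = [] := by
  rw [gIdx, List.filter_eq_nil_iff]
  intro k hk
  have hk' : k < n := List.mem_range.1 hk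
  have := Nat.mod_le k H
  simp only [beq_iff_eq]
  omega

lemma gIdx_map (H s : Nat) (hs : s < H) (m : Nat) :
    gIdx H s (s + m * H) = (List.range m).map (fun q => s + q * H) := by
  induction m with
  | zero => simp [gIdx_small H s s (le_of_lt hs)]
  | succ m ih =>
    rw [show s + (m+1)*H = (s + m*H) + H by ring, gIdx_block H s hs (s + m*H)
      (by rw [Nat.add_mul_mod_self_right, Nat.mod_eq_of_lt hs]) H le_rfl,
      ih, if_pos (by omega), List.range_succ]
    simp

lemma getD_set_self (l : List Int) (i : Nat) (v : Int) (h : i < l.length) :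
    (l.set i v).getD i 0 = v := by
  simp [List.getD_eq_getElem?_getD, h]

lemma getD_set_ne (l : List Int) (i j : Nat) (v : Int) (h : i ≠ j) :
    (l.set i v).getD j 0 = l.getD j 0 := by
  simp [List.getD_eq_getElem?_getD, List.getElem?_set_ne h]

lemma idx_ne {H : Nat} (hH : 0 < H) {s q p : Nat} (h : q ≠ p) : s + q * H ≠ s + p * H := by
  intro he
  exact h (Nat.eq_of_mul_eq_mul_right hH (by omega))

-- the core: one full inner-loop run + the final write, characterised
lemma stepCore (H : Nat) (hH : 0 < H) (s : Nat) (hs : s < H) :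
    ∀ (m : Nat) (c : List Int) (key : Int) (fuel : Nat), m < fuel → s + m * H < c.length →
    ((pvShift fuel c key ((s : Int) + (m : Int) * (H : Int) - (H : Int)) (H : Int)).1.set
        ((pvShift fuel c key ((s : Int) + (m : Int) * (H : Int) - (H : Int)) (H : Int)).2 + (H : Int)).toNat key).length = c.length ∧
    (∀ k, k < c.length → (∀ q, q ≤ m → k ≠ s + q * H) →
      ((pvShift fuel c key ((s : Int) + (m : Int) * (H : Int) - (H : Int)) (H : Int)).1.set
        ((pvShift fuel c key ((s : Int) + (m : Int) * (H : Int) - (H : Int)) (H : Int)).2 + (H : Int)).toNat key).getD k 0 = c.getD k 0) ∧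
    (List.range (m + 1)).map (fun q =>
      ((pvShift fuel c key ((s : Int) + (m : Int) * (H : Int) - (H : Int)) (H : Int)).1.set
        ((pvShift fuel c key ((s : Int) + (m : Int) * (H : Int) - (H : Int)) (H : Int)).2 + (H : Int)).toNat key).getD (s + q * H) 0) =
      (insRev key (((List.range m).map (fun q => c.getD (s + q * H) 0)).reverse)).reverse := by
  intro m
  induction m with
  | zero =>
    intro c key fuel hf hlen
    obtain ⟨f, rfl⟩ : ∃ f, fuel = f + 1 := ⟨fuel - 1, by omega⟩
    have harg : (s : Int) + (0 : Nat) * (H : Int) - (H : Int) = (s : Int) - (H : Int) := by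
      push_cast; ring
    rw [harg, pvShift, if_neg (by omega)]
    have hidx : ((s : Int) - (H : Int) + (H : Int)).toNat = s := by omega
    simp only [hidx]
    refine ⟨by simp, ?_, ?_⟩
    · intro k hk hkq
      exact getD_set_ne _ _ _ _ (fun he => hkq 0 (by omega) (by omega))
    · have h1 : (c.set s key)[s]?.getD 0 = key := by
        simpa [List.getD_eq_getElem?_getD] using getD_set_self c s key (by omega)
      simp [insRev, h1]
  | succ m ih =>
    intro c key fuel hf hlen
    obtain ⟨f, rfl⟩ : ∃ f, fuel = f + 1 := ⟨fuel - 1, by omega⟩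
    have hmH : (m + 1) * H = m * H + H := Nat.succ_mul m H
    have harg : (s : Int) + ((m+1 : Nat) : Int) * (H : Int) - (H : Int) = ((s + m * H : Nat) : Int) := by
      push_cast; ring
    have hget : PySem.List.pyGetD c ((s + m * H : Nat) : Int) 0 = c.getD (s + m * H) 0 := by
      rw [PySem.List.pyGetD_of_nonneg _ _ (by positivity), Int.toNat_natCast]
    have hidx1 : (((s + m * H : Nat) : Int) + (H : Int)).toNat = s + (m + 1) * H := by
      push_cast [hmH]; omega
    rw [harg, pvShift, hget]
    by_cases hkey : key < c.getD (s + m * H) 0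
    · rw [if_pos ⟨by positivity, hkey⟩]
      have harg2 : ((s + m * H : Nat) : Int) - (H : Int) = (s : Int) + (m : Int) * (H : Int) - (H : Int) := by
        push_cast; ring
      rw [harg2, hidx1]
      set x := c.getD (s + m * H) 0 with hxdef
      set c1 := c.set (s + (m + 1) * H) x with hc1
      have hlen1 : c1.length = c.length := by simp [hc1]
      have hmlt : s + m * H < c1.length := by rw [hlen1]; omega
      obtain ⟨IH1, IH2, IH3⟩ := ih c1 key f (by omega) hmlt
      have hcongr : (List.range m).map (fun q => c1.getD (s + q * H) 0) =
          (List.range m).map (fun q => c.getD (s + q * H) 0) := by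
        apply List.map_congr_left
        intro q hq
        exact getD_set_ne _ _ _ _ (idx_ne hH (by simp at hq; omega))
      refine ⟨IH1.trans hlen1, ?_, ?_⟩
      · intro k hk hkq
        rw [IH2 k (by omega) (fun q hq => hkq q (by omega)), hc1,
          getD_set_ne _ _ _ _ (fun he => hkq (m+1) le_rfl he.symm)]
      · rw [List.range_succ, List.map_append, IH3, hcongr]
        simp only [List.map_cons, List.map_nil]
        rw [IH2 (s + (m+1) * H) (by rw [hlen1]; omega) (fun q hq => idx_ne hH (by omega))]
        have hx1 : c1.getD (s + (m+1) * H) 0 = x := by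
          rw [hc1]; exact getD_set_self _ _ _ (by omega)
        rw [hx1]
        have hr : (List.range (m+1)).map (fun q => c.getD (s + q * H) 0) =
            ((List.range m).map (fun q => c.getD (s + q * H) 0)) ++ [x] := by
          rw [List.range_succ, List.map_append]
          simp only [List.map_cons, List.map_nil, ← hxdef]
        rw [hr]
        simp [insRev, hkey]
    · rw [if_neg (by rintro ⟨-, hlt⟩; exact hkey hlt), hidx1]
      refine ⟨by simp, ?_, ?_⟩
      · intro k hk hkq
        exact getD_set_ne _ _ _ _ (fun he => hkq (m+1) le_rfl he.symm)
      · have hself : (c.set (s + (m+1) * H) key).getD (s + (m+1) * H) 0 = key :=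
          getD_set_self _ _ _ (by omega)
        rw [List.range_succ, List.map_append]
        simp only [List.map_cons, List.map_nil, hself]
        rw [List.map_congr_left (fun q hq =>
          getD_set_ne c (s + (m+1) * H) (s + q * H) key (idx_ne hH (by simp at hq; omega)))]
        rw [List.range_succ, List.map_append]
        simp only [List.map_cons, List.map_nil, List.reverse_append, List.reverse_cons,
          List.reverse_nil, List.nil_append, List.cons_append, insRev]
        rw [if_neg hkey]
        simp

lemma stepA_nat (H n i : Nat) (hH : 0 < H) (c : List Int) (hc : c.length = n) (hi : i < n) :
    (pvStepA (H : Int) c (i : Int)).length = n ∧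
    (∀ k, k < n → (k % H ≠ i % H ∨ i < k) → (pvStepA (H : Int) c (i : Int)).getD k 0 = c.getD k 0) ∧
    gVals (pvStepA (H : Int) c (i : Int)) H (i % H) (i + 1) =
      (insRev (c.getD i 0) ((gVals c H (i % H) i).reverse)).reverse := by
  obtain ⟨s, m, hs, rfl⟩ : ∃ s m, s < H ∧ s + m * H = i :=
    ⟨i % H, i / H, Nat.mod_lt _ hH, Nat.mod_add_div' i H⟩
  have hmod : (s + m * H) % H = s := by
    rw [Nat.add_mul_mod_self_right, Nat.mod_eq_of_lt hs]
  obtain ⟨L1, L2, L3⟩ := stepCore H hH s hs m c (c.getD (s + m * H) 0) (s + m * H + 1)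
      (by nlinarith) (by omega)
  have hkey : PySem.List.pyGetD c ((s + m * H : Nat) : Int) 0 = c.getD (s + m * H) 0 := by
    rw [PySem.List.pyGetD_of_nonneg _ _ (by positivity), Int.toNat_natCast]
  have harg : ((s + m * H : Nat) : Int) - (H : Int) = ((s : Int) + (m : Int) * (H : Int) - (H : Int)) := by
    push_cast; ring
  have hA : pvStepA (H : Int) c ((s + m * H : Nat) : Int) =
      (pvShift (s + m * H + 1) c (c.getD (s + m * H) 0) ((s : Int) + (m : Int) * (H : Int) - (H : Int)) (H : Int)).1.set
        ((pvShift (s + m * H + 1) c (c.getD (s + m * H) 0) ((s : Int) + (m : Int) * (H : Int) - (H : Int)) (H : Int)).2 + (H : Int)).toNat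
        (c.getD (s + m * H) 0) := by
    simp only [pvStepA, hkey, harg, Int.toNat_natCast]
  rw [hA, hmod]
  refine ⟨by rw [L1, hc], ?_, ?_⟩
  · intro k hk hor
    refine L2 k (by omega) ?_
    intro q hq he
    rcases hor with hne | hlt
    · apply hne
      rw [he, Nat.add_mul_mod_self_right, Nat.mod_eq_of_lt hs]
    · have hqm : q * H ≤ m * H := Nat.mul_le_mul_right H hq
      omega
  · have hgi : gIdx H s (s + m * H + 1) = (List.range (m + 1)).map (fun q => s + q * H) := by
      rw [gIdx_succ, if_pos hmod, gIdx_map H s hs m, List.range_succ, List.map_append]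
      simp
    have hgi0 : gIdx H s (s + m * H) = (List.range m).map (fun q => s + q * H) :=
      gIdx_map H s hs m
    unfold gVals
    rw [hgi, hgi0, List.map_map, List.map_map]
    simpa [Function.comp] using L3

lemma foldA (H n : Nat) (hH : 0 < H) (a : List Int) (hn : a.length = n) :
    ∀ (d i : Nat) (c : List Int), i + d = n →
    c.length = n →
    (∀ k, i ≤ k → k < n → c.getD k 0 = a.getD k 0) →
    (∀ s, s < H → (gVals c H s i).Perm (gVals a H s i) ∧ (gVals c H s i).Pairwise (· ≤ ·)) →
    ((PySem.List.pyRange (i : Int) (n : Int) 1).foldl (pvStepA (H : Int)) c).length = n ∧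
    (∀ s, s < H →
      ((PySem.List.pyRange (i : Int) (n : Int) 1).foldl (pvStepA (H : Int)) c |> (gVals · H s n)).Perm (gVals a H s n) ∧
      ((PySem.List.pyRange (i : Int) (n : Int) 1).foldl (pvStepA (H : Int)) c |> (gVals · H s n)).Pairwise (· ≤ ·)) := by
  intro d
  induction d with
  | zero =>
    intro i c hd hlen hun hgr
    have hin : i = n := by omega
    subst hin
    rw [show PySem.List.pyRange (i : Int) (i : Int) 1 = [] by
      rw [PySem.List.pyRange_of_pos _ _ (by norm_num)]; simp]
    exact ⟨hlen, hgr⟩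
  | succ d ih =>
    intro i c hd hlen hun hgr
    have hilt : i < n := by omega
    rw [PySem.List.pyRange_one_cons (show (i : Int) < (n : Int) by exact_mod_cast hilt),
      show ((i : Int) + 1) = (((i + 1 : Nat)) : Int) by push_cast; ring, List.foldl_cons]
    obtain ⟨S1, S2, S3⟩ := stepA_nat H n i hH c hlen hilt
    refine ih (i + 1) _ (by omega) S1 ?_ ?_
    · intro k hk hkn
      rw [S2 k hkn (Or.inr (by omega)), hun k (by omega) hkn]
    · intro s hsH
      by_cases hse : s = i % H
      · subst hse
        rw [S3]
        have hai : gVals a H (i % H) (i + 1) = gVals a H (i % H) i ++ [a.getD i 0] := by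
          unfold gVals; rw [gIdx_succ, if_pos rfl, List.map_append]; simp
        have hkeya : c.getD i 0 = a.getD i 0 := hun i le_rfl hilt
        constructor
        · have p1 : ((insRev (c.getD i 0) (gVals c H (i % H) i).reverse).reverse).Perm
              (c.getD i 0 :: gVals c H (i % H) i) :=
            (List.reverse_perm _).trans ((insRev_perm _ _).trans
              (List.Perm.cons _ (List.reverse_perm _)))
          have p2 : (c.getD i 0 :: gVals c H (i % H) i).Perm
              (c.getD i 0 :: gVals a H (i % H) i) :=
            List.Perm.cons _ (hgr (i % H) hsH).1
          rw [hai, ← hkeya]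
          exact (p1.trans p2).trans (List.perm_append_singleton _ _).symm
        · rw [List.pairwise_reverse]
          exact insRev_pairwise _ _ (List.pairwise_reverse.2 ((hgr (i % H) hsH).2.imp (fun h => h)))
      · have hgidx : gIdx H s (i + 1) = gIdx H s i := by
          rw [gIdx_succ, if_neg (fun he => hse he.symm)]; simp
        have hvals : gVals (pvStepA (H : Int) c (i : Int)) H s (i + 1) = gVals c H s i := by
          unfold gVals; rw [hgidx]
          apply List.map_congr_left
          intro k hk
          obtain ⟨hki, hkm⟩ := mem_gIdx.1 hk
          exact S2 k (by omega) (Or.inl (by rw [hkm]; exact hse))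
        have havals : gVals a H s (i + 1) = gVals a H s i := by
          unfold gVals; rw [hgidx]
        rw [hvals, havals]
        exact hgr s hsH

lemma A_char (a : List Int) (H : Nat) (hH : 0 < H) :
    (hInsertionSort a (H : Int)).length = a.length ∧
    (∀ s, s < H →
      (gVals (hInsertionSort a (H : Int)) H s a.length).Perm (gVals a H s a.length) ∧
      (gVals (hInsertionSort a (H : Int)) H s a.length).Pairwise (· ≤ ·)) := by
  by_cases hnH : a.length ≤ H
  · have hempty : PySem.List.pyRange (H : Int) (a.length : Int) 1 = [] := by
      rw [PySem.List.pyRange_of_pos _ _ (by norm_num)]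
      rw [if_neg (by exact_mod_cast Nat.not_lt.2 hnH)]
      simp
    unfold hInsertionSort
    rw [hempty]
    refine ⟨rfl, fun s hsH => ⟨List.Perm.refl _, ?_⟩⟩
    unfold gVals
    rw [gIdx_small H s a.length hnH]
    split_ifs <;> simp
  · push_neg at hnH
    have := foldA H a.length hH a rfl (a.length - H) H a (by omega) rfl
      (fun k _ _ => rfl) ?_
    · exact this
    · intro s hsH
      unfold gVals
      rw [gIdx_small H s H le_rfl, if_pos hsH]
      exact ⟨List.Perm.refl _, by simp⟩

-- B side
lemma pyRange_step_eq_gIdx (H s n : Nat) (hH : 0 < H) (hs : s < H) :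
    PySem.List.pyRange (s : Int) (n : Int) (H : Int) = (gIdx H s n).map (fun k : Nat => (k : Int)) := by
  have hHi : (0 : Int) < (H : Int) := by exact_mod_cast hH
  have hp1 : (PySem.List.pyRange (s : Int) (n : Int) (H : Int)).Pairwise (· < ·) := by
    rw [PySem.List.pyRange_of_pos _ _ hHi]
    refine List.Pairwise.map _ ?_ List.pairwise_lt_range
    intro x y hxy
    have hxy' : (H : Int) * (x : Int) < (H : Int) * (y : Int) :=
      mul_lt_mul_of_pos_left (by exact_mod_cast hxy) hHi
    linarith
  have hp2 : ((gIdx H s n).map (fun k : Nat => (k : Int))).Pairwise (· < ·) := by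
    refine List.Pairwise.map (fun k : Nat => (k : Int)) ?_ (gIdx_pairwise H s n)
    intro x y hxy
    show (x : Int) < (y : Int)
    exact_mod_cast hxy
  have hmem : ∀ x, x ∈ PySem.List.pyRange (s : Int) (n : Int) (H : Int) ↔
      x ∈ (gIdx H s n).map (fun k : Nat => (k : Int)) := by
    intro x
    rw [PySem.List.mem_pyRange_iff_of_pos hHi]
    simp only [List.mem_map]
    constructor
    · rintro ⟨hsx, hxn, d, hd⟩
      have hd0 : 0 ≤ d := by
        by_contra hneg
        push_neg at hneg
        have : (H : Int) * d < 0 := mul_neg_of_pos_of_neg hHi hneg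
        omega
      have hx : x = ((s + H * d.toNat : Nat) : Int) := by
        push_cast
        rw [Int.toNat_of_nonneg hd0]
        omega
      refine ⟨s + H * d.toNat, mem_gIdx.2 ⟨by omega, ?_⟩, hx.symm⟩
      rw [Nat.add_mul_mod_self_left, Nat.mod_eq_of_lt hs]
    · rintro ⟨k, hk, rfl⟩
      obtain ⟨hkn, hkm⟩ := mem_gIdx.1 hk
      have hsk : s ≤ k := hkm ▸ Nat.mod_le k H
      refine ⟨by exact_mod_cast hsk, by exact_mod_cast hkn, (k / H : Nat), ?_⟩
      have hdm := Nat.div_add_mod k H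
      have hk2 : (k : Int) = (H : Int) * ((k / H : Nat) : Int) + (s : Int) := by
        exact_mod_cast (hkm ▸ hdm).symm
      omega
  have nd1 : (PySem.List.pyRange (s : Int) (n : Int) (H : Int)).Nodup :=
    hp1.imp (fun h => ne_of_lt h)
  have nd2 : ((gIdx H s n).map (fun k : Nat => (k : Int))).Nodup :=
    hp2.imp (fun h => ne_of_lt h)
  exact List.eq_of_perm_of_sorted (fun a b _ _ h1 h2 => absurd h1 (lt_asymm h2)) hp1 hp2
    ((List.perm_ext_iff_of_nodup nd1 nd2).2 hmem)

lemma gather_char (c : List Int) (H s : Nat) (hH : 0 < H) (hs : s < H) :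
    (PySem.List.slice? c (some (s : Int)) none (H : Int)).getD [] = gVals c H s c.length := by
  have hHne : ¬ ((H : Int) = 0) := by omega
  have h1 : ¬ ((H : Int) < 0) := by omega
  have h2 : ¬ ((s : Int) < 0) := by omega
  have hmapD : ∀ l : List Nat, (∀ k ∈ l, k < c.length) →
      l.filterMap (fun k : Nat => getElem? c ((k : Int)).toNat) = l.map (fun k => c.getD k 0) := by
    intro l
    have hfe : (fun k : Nat => getElem? c ((k : Int)).toNat) = (fun k : Nat => getElem? c k) := by
      funext k
      rw [Int.toNat_natCast]
    rw [hfe]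
    induction l with
    | nil => intro _; rfl
    | cons k l ih =>
      intro hl
      have hk : k < c.length := hl k List.mem_cons_self
      simp only [List.filterMap_cons, List.map_cons, List.getElem?_eq_getElem hk]
      rw [ih (fun k' hk' => hl k' (List.mem_cons_of_mem _ hk'))]
      simp [List.getD_eq_getElem?_getD, List.getElem?_eq_getElem hk]
  by_cases hsn : (s : Int) < (c.length : Int)
  · have hsl : PySem.List.slice? c (some (s : Int)) none (H : Int) =
        some (List.filterMap (fun k : Nat => getElem? c ((s : Int) + (H : Int) * (k : Int)).toNat)
          (List.range ((((c.length : Int) - (s : Int) + (H : Int) - 1) / (H : Int)).toNat))) := by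
      rw [PySem.List.slice?, if_neg hHne]
      simp only [PySem.List.sliceIndices]
      rw [if_neg h1, if_neg h2]
      simp only [if_neg h1, if_pos (show (0 : Int) < (H : Int) by omega)]
      rw [min_eq_left (le_of_lt hsn), if_pos hsn]
    rw [hsl, Option.getD_some]
    have hpr : PySem.List.pyRange (s : Int) (c.length : Int) (H : Int) =
        List.map (fun k : Nat => (s : Int) + (H : Int) * (k : Int))
          (List.range ((((c.length : Int) - (s : Int) + (H : Int) - 1) / (H : Int)).toNat)) := by
      rw [PySem.List.pyRange_of_pos _ _ (show (0 : Int) < (H : Int) by omega), if_pos hsn]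
    have hfm : List.filterMap (fun k : Nat => getElem? c ((s : Int) + (H : Int) * (k : Int)).toNat)
          (List.range ((((c.length : Int) - (s : Int) + (H : Int) - 1) / (H : Int)).toNat)) =
        List.filterMap (fun x : Int => getElem? c x.toNat)
          (PySem.List.pyRange (s : Int) (c.length : Int) (H : Int)) := by
      rw [hpr, List.filterMap_map]
      rfl
    rw [hfm, pyRange_step_eq_gIdx H s c.length hH hs, List.filterMap_map]
    exact hmapD (gIdx H s c.length) (fun k hk => (mem_gIdx.1 hk).1)
  · have hsl : PySem.List.slice? c (some (s : Int)) none (H : Int) = some [] := by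
      rw [PySem.List.slice?, if_neg hHne]
      simp only [PySem.List.sliceIndices]
      rw [if_neg h1, if_neg h2]
      simp only [if_neg h1, if_pos (show (0 : Int) < (H : Int) by omega)]
      rw [min_eq_right (by omega), if_neg (by omega)]
      simp
    rw [hsl, Option.getD_some]
    have : gIdx H s c.length = [] := by
      rw [gIdx, List.filter_eq_nil_iff]
      intro k hk
      have hk' : k < c.length := List.mem_range.1 hk
      have : k % H ≤ k := Nat.mod_le k H
      simp only [beq_iff_eq]
      omega
    simp [gVals, this]

lemma scatter_char (idx : List Nat) :
    ∀ (vs : List Int) (c : List Int), idx.Nodup → (∀ k ∈ idx, k < c.length) → vs.length = idx.length →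
    (pvScatter c (idx.map (fun k : Nat => (k : Int))) vs).length = c.length ∧
    (∀ k, k < c.length → k ∉ idx → (pvScatter c (idx.map (fun k : Nat => (k : Int))) vs).getD k 0 = c.getD k 0) ∧
    idx.map (fun k => (pvScatter c (idx.map (fun k : Nat => (k : Int))) vs).getD k 0) = vs := by
  induction idx with
  | nil =>
    intro vs c hnd hrange hlen
    have hvs : vs = [] := List.length_eq_zero_iff.1 (by simpa using hlen)
    subst hvs
    exact ⟨rfl, fun _ _ _ => rfl, rfl⟩
  | cons k idx ih =>
    intro vs c hnd hrange hlen
    obtain ⟨v, vs', rfl⟩ : ∃ v vs', vs = v :: vs' := by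
      cases vs with
      | nil => simp at hlen
      | cons v vs' => exact ⟨v, vs', rfl⟩
    have hrec : pvScatter c ((k :: idx).map (fun k : Nat => (k : Int))) (v :: vs') =
        pvScatter (c.set k v) (idx.map (fun k : Nat => (k : Int))) vs' := by
      simp [pvScatter]
    have hkc : k < c.length := hrange k (List.mem_cons_self)
    obtain ⟨hnk, hnd'⟩ := List.nodup_cons.1 hnd
    obtain ⟨I1, I2, I3⟩ := ih vs' (c.set k v) hnd'
      (fun k' hk' => by rw [List.length_set]; exact hrange k' (List.mem_cons_of_mem _ hk'))
      (by simpa using hlen)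
    rw [hrec]
    refine ⟨by rw [I1, List.length_set], ?_, ?_⟩
    · intro k' hk' hk'n
      rw [I2 k' (by rw [List.length_set]; omega) (fun h => hk'n (List.mem_cons_of_mem _ h)),
        getD_set_ne _ _ _ _ (fun he => hk'n (by rw [← he]; exact List.mem_cons_self))]
    · simp only [List.map_cons]
      rw [I3, I2 k (by rw [List.length_set]; omega) hnk, getD_set_self _ _ _ hkc]

lemma B_char (a : List Int) (H : Nat) (hH : 0 < H) :
    (hInsertionSort_alt a (H : Int)).length = a.length ∧
    (∀ s, s < H →
      gVals (hInsertionSort_alt a (H : Int)) H s a.length =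
        PySem.List.sorted (gVals a H s a.length) (fun x => x)) := by
  have hgen : ∀ (t s₀ : Nat) (c : List Int), s₀ + t = min H a.length → c.length = a.length →
      (∀ s, s < H → gVals c H s a.length =
        if s < s₀ then PySem.List.sorted (gVals a H s a.length) (fun x => x)
        else gVals a H s a.length) →
      (((List.range' s₀ t).map (fun k : Nat => (k : Int))).foldl
          (fun acc s =>
            let g := (PySem.List.slice? acc (some s) none (H : Int)).getD []
            pvScatter acc (PySem.List.pyRange s (acc.length : Int) (H : Int))
              (PySem.List.sorted g (fun x => x))) c).length = a.length ∧
      (∀ s, s < H →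
        gVals (((List.range' s₀ t).map (fun k : Nat => (k : Int))).foldl
          (fun acc s =>
            let g := (PySem.List.slice? acc (some s) none (H : Int)).getD []
            pvScatter acc (PySem.List.pyRange s (acc.length : Int) (H : Int))
              (PySem.List.sorted g (fun x => x))) c) H s a.length =
          PySem.List.sorted (gVals a H s a.length) (fun x => x)) := by
    intro t
    induction t with
    | zero =>
      intro s₀ c ht hlen hinv
      refine ⟨hlen, fun s hs => ?_⟩
      rcases Nat.lt_or_ge s s₀ with hlt | hge
      · have := hinv s hs
        rwa [if_pos hlt] at this
      · -- s₀ = min H a.length ≤ s < H forces a.length ≤ s: the group is empty on both sides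
        have hna : a.length ≤ s := by omega
        have h1 : gIdx H s a.length = [] := gIdx_ge_nil H s a.length hna
        unfold gVals
        rw [h1]
        simp [PySem.List.sorted]
    | succ t ih =>
      intro s₀ c ht hlen hinv
      have hs₀ : s₀ < H := by omega
      rw [List.range'_succ, List.map_cons, List.foldl_cons]
      have hred : (let g := (PySem.List.slice? c (some ((s₀ : Nat) : Int)) none (H : Int)).getD []
            pvScatter c (PySem.List.pyRange ((s₀ : Nat) : Int) (c.length : Int) (H : Int))
              (PySem.List.sorted g (fun x => x))) =
          pvScatter c ((gIdx H s₀ a.length).map (fun k : Nat => (k : Int)))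
            (PySem.List.sorted (gVals a H s₀ a.length) (fun x => x)) := by
        show pvScatter c (PySem.List.pyRange (s₀ : Int) (c.length : Int) (H : Int))
            (PySem.List.sorted ((PySem.List.slice? c (some (s₀ : Int)) none (H : Int)).getD [])
              (fun x => x)) = _
        rw [gather_char c H s₀ hH hs₀, hlen, pyRange_step_eq_gIdx H s₀ a.length hH hs₀]
        have hthis := hinv s₀ hs₀
        rw [if_neg (by omega)] at hthis
        rw [hthis]
      rw [hred]
      obtain ⟨S1, S2, S3⟩ := scatter_char (gIdx H s₀ a.length)
        (PySem.List.sorted (gVals a H s₀ a.length) (fun x => x)) c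
        (gIdx_nodup H s₀ a.length)
        (fun k hk => by rw [hlen]; exact (mem_gIdx.1 hk).1)
        (by rw [PySem.List.length_sorted]; exact List.length_map ..)
      refine ih (s₀ + 1) _ (by omega) (S1.trans hlen) ?_
      intro s hs
      by_cases hse : s = s₀
      · subst hse
        rw [if_pos (by omega)]
        unfold gVals
        exact S3
      · have hout : gVals (pvScatter c ((gIdx H s₀ a.length).map (fun k : Nat => (k : Int)))
            (PySem.List.sorted (gVals a H s₀ a.length) (fun x => x))) H s a.length =
            gVals c H s a.length := by
          unfold gVals
          apply List.map_congr_left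
          intro k hk
          obtain ⟨hkn, hkm⟩ := mem_gIdx.1 hk
          refine S2 k (by omega) ?_
          intro hmem
          exact hse (hkm.symm.trans ((mem_gIdx.1 hmem).2))
        rw [hout, hinv s hs]
        rcases Nat.lt_or_ge s s₀ with h | h
        · rw [if_pos h, if_pos (by omega)]
        · rw [if_neg (by omega), if_neg (by omega)]
  unfold hInsertionSort_alt
  rw [show min (H : Int) (a.length : Int) = ((min H a.length : Nat) : Int) by push_cast; rfl,
    PySem.List.pyRange_zero_natCast (min H a.length), List.range_eq_range']
  exact hgen (min H a.length) 0 a (by omega) rfl (fun s hs => by rw [if_neg (by omega)])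

lemma ext_by_groups (H n : Nat) (hH : 0 < H) (c d : List Int)
    (hc : c.length = n) (hd : d.length = n)
    (h : ∀ s, s < H → gVals c H s n = gVals d H s n) : c = d := by
  apply List.ext_getElem (by omega)
  intro k h1 h2
  have hk : k < n := by omega
  have hmem : k ∈ gIdx H (k % H) n := mem_gIdx.2 ⟨hk, rfl⟩
  have he := (List.map_inj_left.1 (h (k % H) (Nat.mod_lt _ hH))) k hmem
  simpa [List.getD_eq_getElem?_getD, List.getElem?_eq_getElem, h1, h2] using he

lemma main_pos (a : List Int) (H : Nat) (hH : 0 < H) :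
    hInsertionSort a (H : Int) = hInsertionSort_alt a (H : Int) := by
  obtain ⟨LA, HA⟩ := A_char a H hH
  obtain ⟨LB, HB⟩ := B_char a H hH
  apply ext_by_groups H a.length hH _ _ LA LB
  intro s hs
  rw [HB s hs]
  exact (PySem.List.sorted_id_eq_of_perm_of_pairwise _ _ (HA s hs).1 (HA s hs).2).symm

lemma main_zero (a : List Int) : hInsertionSort a 0 = hInsertionSort_alt a 0 := by
  have hstep : ∀ (c : List Int) (i : Nat), i < c.length → pvStepA 0 c (i : Int) = c := by
    intro c i hi
    have hkey : PySem.List.pyGetD c (i : Int) 0 = c.getD i 0 := by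
      rw [PySem.List.pyGetD_of_nonneg _ _ (by positivity), Int.toNat_natCast]
    simp only [pvStepA, hkey, sub_zero, pvShift]
    rw [if_neg (by simp [hkey])]
    simp only [add_zero, Int.toNat_natCast]
    rw [List.getD_eq_getElem?_getD, List.getElem?_eq_getElem hi, Option.getD_some]
    exact List.set_getElem_self hi
  have haux : ∀ (d i : Nat), i + d = a.length →
      (PySem.List.pyRange (i : Int) (a.length : Int) 1).foldl (pvStepA 0) a = a := by
    intro d
    induction d with
    | zero =>
      intro i hd
      rw [PySem.List.pyRange_of_pos _ _ (by norm_num), if_neg (by omega)]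
      simp
    | succ d ih =>
      intro i hd
      rw [PySem.List.pyRange_one_cons (show (i : Int) < (a.length : Int) by exact_mod_cast (by omega : i < a.length)),
        List.foldl_cons, hstep a i (by omega),
        show ((i : Int) + 1) = (((i + 1 : Nat)) : Int) by push_cast; ring]
      exact ih (i + 1) (by omega)
  unfold hInsertionSort hInsertionSort_alt
  have h1 := haux a.length 0 (by omega)
  rw [Nat.cast_zero] at h1
  rw [h1, show min (0 : Int) (a.length : Int) = (0 : Int) from min_eq_left (by positivity),
    show PySem.List.pyRange (0 : Int) (0 : Int) 1 = [] from by
      rw [PySem.List.pyRange_of_pos _ _ (by norm_num)]; simp]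
  rfl

-- ===== VERDICT (by name: the statement is the Claim_ definition above) =====
theorem hInsertionSort_spec : Claim_equal_hInsertionSort := by
  intro a h _ hpre
  unfold Spec_hInsertionSort
  have h0 : h = ((h.toNat : Nat) : Int) := (Int.toNat_of_nonneg hpre).symm
  rw [h0]
  rcases Nat.eq_zero_or_pos h.toNat with hz | hp
  · rw [hz]; exact main_zero a
  · exact main_pos a h.toNat hp
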